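-- pv_equiv track=rewrite | github.com/MLL-LabChartAgentVagen/chartAgentVAGEN | examples/line_generator.py | _filter_middle_indices
-- ===== SOURCE A (Python) =====
-- from typing import List, Dict, Union, Tuple
--
-- def _filter_middle_indices(numbers: List):
--     if not numbers:
--         return []
--
--     # Find the min and max values
--     min_val = min(numbers)
--     max_val = max(numbers)
--
--     # Find indices of min and max values
--     min_indices = {i for i, num in enumerate(numbers) if num == min_val}
--     max_indices = {i for i, num in enumerate(numbers) if num == max_val}
--
--     # Filter out indices that are neither min nor max
--     result = [i for i in range(len(numbers)) if i not in min_indices and i not in max_indices]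
--     return result
-- ===== SOURCE B (Python) =====
-- def _filter_middle_indices(numbers):
--     if not numbers:
--         return []
--     min_val = min(numbers)
--     max_val = max(numbers)
--     # single pass: compare values directly, no intermediate index sets
--     return [i for i, num in enumerate(numbers) if num != min_val and num != max_val]
-- ===== Notes on version B (the rewrite author's own statement) =====
-- stated objective: simpler
-- what changed: Replaced the build-two-index-sets-then-filter-range-by-membership shape with one direct enumerate pass that keeps indices whose value equals neither min nor max, eliminating the intermediate index tables.
import Mathlib
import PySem

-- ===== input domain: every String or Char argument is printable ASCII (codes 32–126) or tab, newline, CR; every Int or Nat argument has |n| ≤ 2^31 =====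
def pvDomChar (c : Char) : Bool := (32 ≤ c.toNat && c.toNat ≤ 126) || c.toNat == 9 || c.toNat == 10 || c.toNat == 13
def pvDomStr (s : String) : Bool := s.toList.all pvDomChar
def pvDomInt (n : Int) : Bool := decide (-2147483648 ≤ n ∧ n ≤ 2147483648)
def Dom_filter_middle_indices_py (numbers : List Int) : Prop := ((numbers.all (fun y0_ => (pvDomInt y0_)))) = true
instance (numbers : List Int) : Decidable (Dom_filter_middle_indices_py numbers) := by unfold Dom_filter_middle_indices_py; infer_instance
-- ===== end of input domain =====

-- B replaces A's two index sets and range-membership filter by one direct value-comparison pass (objective: simpler).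

-- ===== PORT A =====
def filter_middle_indices_py (numbers : List Int) : List Int :=
  if numbers = [] then []
  else
    -- numbers ≠ [], so min?/max? are some; the .getD 0 default is never used
    let min_val : Int := (PySem.List.min? numbers (fun y => y)).getD 0
    let max_val : Int := (PySem.List.max? numbers (fun y => y)).getD 0
    let min_indices : PySem.Set Int :=
      PySem.Set.ofList ((PySem.List.enumerate numbers 0).filterMap
        (fun p => if p.2 = min_val then some p.1 else none))
    let max_indices : PySem.Set Int :=
      PySem.Set.ofList ((PySem.List.enumerate numbers 0).filterMap
        (fun p => if p.2 = max_val then some p.1 else none))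
    (PySem.List.pyRange 0 (numbers.length : Int) 1).filter
      (fun i => !(PySem.Set.contains min_indices i) && !(PySem.Set.contains max_indices i))

-- ===== PORT B =====
def filter_middle_indices_py_alt (numbers : List Int) : List Int :=
  if numbers = [] then []
  else
    let min_val : Int := (PySem.List.min? numbers (fun y => y)).getD 0
    let max_val : Int := (PySem.List.max? numbers (fun y => y)).getD 0
    (PySem.List.enumerate numbers 0).filterMap
      (fun p => if p.2 ≠ min_val ∧ p.2 ≠ max_val then some p.1 else none)

-- ===== PRECONDITION & SPEC =====
def Spec_filter_middle_indices_py (numbers : List Int) (out : List Int) : Prop := out = filter_middle_indices_py_alt numbers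
instance (numbers : List Int) (out : List Int) : Decidable (Spec_filter_middle_indices_py numbers out) := by unfold Spec_filter_middle_indices_py; infer_instance

-- ===== CLAIM (what is proved, stated in full; the proofs are below) =====
def Claim_equal_filter_middle_indices_py : Prop := ∀ (numbers : List Int), Dom_filter_middle_indices_py numbers → Spec_filter_middle_indices_py numbers (filter_middle_indices_py numbers)

-- ===== LEMMAS AND PROOFS =====

-- B's enumerate pass, rephrased as a filter over range(len) (B-side only)
lemma filterMap_if_eq_filter (l : List Int) (P : Int → Prop) [DecidablePred P] :
    l.filterMap (fun j => if P j then some j else none) = l.filter (fun j => decide (P j)) := by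
  induction l with
  | nil => rfl
  | cons h t ih =>
      by_cases hp : P h
      · simp [hp, ih]
      · simp [hp, ih]

lemma altB_eq_filter (xs : List Int) (mv Mv : Int) :
    (PySem.List.enumerate xs 0).filterMap
        (fun p => if p.2 ≠ mv ∧ p.2 ≠ Mv then some p.1 else none) =
    (PySem.List.pyRange 0 (xs.length : Int) 1).filter
        (fun j => decide (PySem.List.pyGetD xs j 0 ≠ mv ∧ PySem.List.pyGetD xs j 0 ≠ Mv)) := by
  rw [PySem.List.enumerate_eq_map_pyRange xs 0, List.filterMap_map]
  have hcomp : ((fun p : Int × Int => if p.2 ≠ mv ∧ p.2 ≠ Mv then some p.1 else none) ∘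
      (fun j => (j, PySem.List.pyGetD xs j 0))) =
      (fun j => if PySem.List.pyGetD xs j 0 ≠ mv ∧ PySem.List.pyGetD xs j 0 ≠ Mv
        then some j else none) := rfl
  rw [hcomp, filterMap_if_eq_filter _
    (fun j => PySem.List.pyGetD xs j 0 ≠ mv ∧ PySem.List.pyGetD xs j 0 ≠ Mv)]
  simp [PySem.List.len_eq]

-- ===== VERDICT (by name: the statement is the Claim_ definition above) =====
theorem filter_middle_indices_py_spec : Claim_equal_filter_middle_indices_py := by
  intro numbers _
  unfold Spec_filter_middle_indices_py filter_middle_indices_py filter_middle_indices_py_alt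
  by_cases hnil : numbers = []
  · simp [hnil]
  · simp only [if_neg hnil]
    set mv : Int := (PySem.List.min? numbers (fun y => y)).getD 0 with hmv
    set Mv : Int := (PySem.List.max? numbers (fun y => y)).getD 0 with hMv
    rw [altB_eq_filter]
    apply List.filter_congr
    intro i hi
    rw [PySem.List.mem_pyRange_one] at hi
    have hi0 : 0 ≤ i := hi.1
    have hilen : i.toNat < numbers.length := by omega
    have hget : PySem.List.pyGetD numbers i 0 = numbers[i.toNat] :=
      PySem.List.pyGetD_eq_getElem _ _ hi0 (by simpa using hi.2)
    have hmem2 : ∀ v : Int, ((i, v) ∈ PySem.List.enumerate numbers 0) ↔ numbers[i.toNat] = v := by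
      intro v
      rw [PySem.List.mem_enumerate_iff]
      constructor
      · rintro ⟨k, hk, hp⟩
        rw [Prod.ext_iff] at hp
        obtain ⟨h1, h2⟩ := hp
        have hki : k = i.toNat := by simp at h1; omega
        subst hki
        exact h2.symm
      · intro hv
        refine ⟨i.toNat, hilen, ?_⟩
        rw [Prod.ext_iff]
        exact ⟨by simp; omega, hv.symm⟩
    simp [hmem2, hget]
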